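-- pv_equiv track=rewrite | github.com/chrisviola1/RNASequencing | Minimap2_Error_Detection.py | last_type
-- ===== SOURCE A (Python) =====
-- def findOccurrences(s, ch):
--     """From a string, indentifies all index positions of a character.
--     Args:
--         s(string): some string to look at
--         ch(string): the character to look for in the string, s.
--     Returns:
--         a list of index positions where ch shows up
--     """
--     return [i for i, letter in enumerate(s) if letter == ch]
--
-- def last_type(mini, index, block_start):
--     """Indentifies the last error type in the block previous
--         to the one being tested.
--     Args:
--         mini(sam file as a string): the minimap2 sam file
--         index(int): the position of the letter being tested
--         block_start(int): the start position of error types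
--     Returns:
--         int(last_type)(int): the position of the last error type in the cs string
--     """
--     last_type = 0
--     types = ['-','+','*','=']
--     smaller = mini[:block_start]
--     last_type = 0
--     for t in types:
--         certain_type = 0
--         occ = findOccurrences(smaller,t)
--         if len(occ) == 0:
--             certain_type = 0
--         else:
--             certain_type = max(occ)
--         if certain_type > last_type:
--             last_type = certain_type
--     return int(last_type)
-- ===== SOURCE B (Python) =====
-- def last_type(mini, index, block_start):
--     """Single backward scan: first error-type char index before block_start, else 0."""
--     s = mini[:block_start]
--     for i in range(len(s) - 1, -1, -1):
--         if s[i] in '-+*=':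
--             return int(i)
--     return 0
-- ===== Notes on version B (the rewrite author's own statement) =====
-- stated objective: faster
-- what changed: Replaces four full forward scans (building an occurrence list per error char and taking its max) with one early-exit backward scan over the prefix that returns the first index holding any of '-','+','*','='.
import Mathlib
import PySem

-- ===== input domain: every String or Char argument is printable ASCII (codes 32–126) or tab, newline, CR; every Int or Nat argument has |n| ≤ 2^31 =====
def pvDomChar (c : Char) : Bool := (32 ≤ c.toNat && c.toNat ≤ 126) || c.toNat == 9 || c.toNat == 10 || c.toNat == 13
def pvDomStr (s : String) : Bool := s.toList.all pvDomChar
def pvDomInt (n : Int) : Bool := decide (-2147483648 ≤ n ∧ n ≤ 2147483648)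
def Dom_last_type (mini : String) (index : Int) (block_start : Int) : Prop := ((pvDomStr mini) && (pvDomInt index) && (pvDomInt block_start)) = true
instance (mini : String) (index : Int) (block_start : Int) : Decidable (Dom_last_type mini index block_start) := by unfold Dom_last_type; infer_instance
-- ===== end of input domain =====

-- B replaces A's four forward occurrence-list scans with one early-exit backward scan (faster by a constant factor).

-- ===== PORT A =====
-- [i for i, letter in enumerate(s) if letter == ch]
def findOccurrences (s : List Char) (ch : Char) : List Int :=
  (PySem.List.enumerate s).filterMap (fun p => if p.2 = ch then some p.1 else none)

def last_type (mini : String) (index : Int) (block_start : Int) : Int :=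
  let types : List Char := ['-', '+', '*', '=']
  let smaller := PySem.List.slice mini.toList none (some block_start)
  types.foldl (fun lt t =>
    let occ := findOccurrences smaller t
    -- max(occ) only reached with occ ≠ []; .getD 0 is never used
    let certain : Int := if occ.length = 0 then 0 else (PySem.List.max? occ id).getD 0
    if certain > lt then certain else lt) 0

-- ===== PORT B =====
-- for i in range(len(s)-1, -1, -1): if s[i] in '-+*=': return i ; return 0
-- (index i is always in range, so the .getD default ' ' is never read)
def bscan (l : List Char) : Nat → Int
  | 0 => 0
  | i + 1 => if l.getD i ' ' ∈ (['-', '+', '*', '='] : List Char) then (i : Int) else bscan l i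

def last_type_alt (mini : String) (index : Int) (block_start : Int) : Int :=
  let s := PySem.List.slice mini.toList none (some block_start)
  bscan s s.length

-- ===== PRECONDITION & SPEC =====
def Spec_last_type (mini : String) (index : Int) (block_start : Int) (out : Int) : Prop := out = last_type_alt mini index block_start
instance (mini : String) (index : Int) (block_start : Int) (out : Int) : Decidable (Spec_last_type mini index block_start out) := by unfold Spec_last_type; infer_instance

-- ===== CLAIM (what is proved, stated in full; the proofs are below) =====
def Claim_equal_last_type : Prop := ∀ (mini : String) (index : Int) (block_start : Int), Dom_last_type mini index block_start → Spec_last_type mini index block_start (last_type mini index block_start)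

-- ===== LEMMAS AND PROOFS =====

/-- A's per-character "last occurrence, 0 if none" value. -/
def certain (l : List Char) (t : Char) : Int :=
  let occ := findOccurrences l t
  if occ.length = 0 then 0 else (PySem.List.max? occ id).getD 0

theorem last_type_eq_certains (mini : String) (index block_start : Int) :
    last_type mini index block_start =
      (let l := PySem.List.slice mini.toList none (some block_start)
       let m : Int → Int → Int := fun lt c => if c > lt then c else lt
       m (m (m (m 0 (certain l '-')) (certain l '+')) (certain l '*')) (certain l '=')) := by
  simp [last_type, certain, List.foldl]

theorem findOccurrences_append_singleton (l : List Char) (c t : Char) :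
    findOccurrences (l ++ [c]) t =
      findOccurrences l t ++ (if c = t then [(l.length : Int)] else []) := by
  simp only [findOccurrences, PySem.List.enumerate_append, List.filterMap_append]
  congr 1
  by_cases hc : c = t <;> simp [PySem.List.enumerate, hc]

theorem certain_mem_bounds (l : List Char) (t : Char) :
    0 ≤ certain l t ∧ certain l t ≤ (l.length : Int) := by
  by_cases h : (findOccurrences l t).length = 0
  · simp [certain, h]
  · simp only [certain]
    rw [if_neg h]
    rcases ho : PySem.List.max? (findOccurrences l t) id with _ | m
    · rw [PySem.List.max?_eq_none_iff] at ho
      simp [ho] at h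
    · have hm : m ∈ findOccurrences l t := PySem.List.max?_mem ho
      simp only [findOccurrences, List.mem_filterMap] at hm
      obtain ⟨p, hp, hpe⟩ := hm
      rw [PySem.List.mem_enumerate_iff] at hp
      obtain ⟨k, hk, rfl⟩ := hp
      split at hpe <;> simp_all
      omega

theorem certain_nil (t : Char) : certain [] t = 0 := rfl

theorem max?_append_singleton_of_lt (xs : List Int) (m : Int)
    (h : ∀ x ∈ xs, x < m) : PySem.List.max? (xs ++ [m]) id = some m := by
  simp only [PySem.List.max?, List.foldl_append] at *
  rcases ho : PySem.List.max? xs id with _ | a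
  · simp only [PySem.List.max?] at ho
    rw [ho]
    rfl
  · have ha : a ∈ xs := PySem.List.max?_mem ho
    simp only [PySem.List.max?] at ho
    rw [ho]
    simp [List.foldl, h a ha]

theorem certain_append_singleton (l : List Char) (c t : Char) :
    certain (l ++ [c]) t = if c = t then (l.length : Int) else certain l t := by
  simp only [certain]
  rw [findOccurrences_append_singleton]
  by_cases hc : c = t
  · have hmax : PySem.List.max? (findOccurrences l t ++ [(l.length : Int)]) id
        = some (l.length : Int) := by
      apply max?_append_singleton_of_lt
      intro x hx
      simp only [findOccurrences, List.mem_filterMap] at hx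
      obtain ⟨p, hp, hpe⟩ := hx
      rw [PySem.List.mem_enumerate_iff] at hp
      obtain ⟨k, hk, rfl⟩ := hp
      split at hpe <;> simp_all
      omega
    simp [hc, hmax]
  · simp [hc]

theorem bscan_append (l : List Char) (c : Char) :
    ∀ i, i ≤ l.length → bscan (l ++ [c]) i = bscan l i := by
  intro i
  induction i with
  | zero => intro _; rfl
  | succ i ih =>
    intro h
    simp only [bscan]
    rw [List.getD_append _ _ _ _ (by omega), ih (by omega)]

theorem core (l : List Char) :
    (let m : Int → Int → Int := fun lt c => if c > lt then c else lt
     m (m (m (m 0 (certain l '-')) (certain l '+')) (certain l '*')) (certain l '=')) =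
      bscan l l.length := by
  induction l using List.reverseRecOn with
  | nil => simp [certain_nil, bscan]
  | append_singleton l c ih =>
    simp only [certain_append_singleton, List.length_append, List.length_cons, List.length_nil]
    have hget : (l ++ [c]).getD l.length ' ' = c := by
      simp
    have hscan : bscan (l ++ [c]) (l.length + 1)
        = if c ∈ (['-', '+', '*', '='] : List Char) then (l.length : Int) else bscan l l.length := by
      simp only [bscan, hget]
      split <;> [rfl; exact bscan_append l c l.length le_rfl]
    rw [show l.length + 0 + 1 = l.length + 1 by omega, hscan]
    have b1 := certain_mem_bounds l '-'
    have b2 := certain_mem_bounds l '+'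
    have b3 := certain_mem_bounds l '*'
    have b4 := certain_mem_bounds l '='
    by_cases h : c ∈ (['-', '+', '*', '='] : List Char)
    · rw [if_pos h]
      fin_cases h <;> simp_all <;> split_ifs <;> omega
    · rw [if_neg h, ← ih]
      have h' : ¬ c = '-' ∧ ¬ c = '+' ∧ ¬ c = '*' ∧ ¬ c = '=' := by
        simpa [not_or] using h
      simp [h'.1, h'.2.1, h'.2.2.1, h'.2.2.2]

-- ===== VERDICT (by name: the statement is the Claim_ definition above) =====
theorem last_type_spec : Claim_equal_last_type := by
  intro mini index block_start _
  unfold Spec_last_type last_type_alt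
  rw [last_type_eq_certains]
  exact core _
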